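-- pv_equiv track=rewrite | github.com/ryanrusli/AoA_Sem3_FinalProject | shannon_fano_structure.py | divide_list
-- ===== SOURCE A (Python) =====
-- def divide_list(listt):
--     all_m = []
--     left = 0
--     right = 0
--     for i in range(0, len(listt)):
--         for j in range(i + 1, len(listt)):
--             right += listt[j][1]
--
--         for l in range(i, -1, -1):
--             left += listt[l][1]
--
--         between = abs(right - left)
--
--         all_m.append(between)
--
--         left = 0
--         right = 0
--
--     # find min minus
--     min = [all_m[0], 0]
--     for z in range(1, len(all_m)):
--         if all_m[z] < min[0]:
--             min = [all_m[z], z]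
--
--     # cutting
--     index_of_min = min[1]
--
--     return listt[0:index_of_min + 1], listt[index_of_min + 1:]
-- ===== SOURCE B (Python) =====
-- def divide_list(listt):
--     total = sum(w for _, w in listt)
--     run = 0
--     best_d = None
--     best_i = 0
--     for i, (_, w) in enumerate(listt):
--         run += w
--         d = abs(total - 2 * run)
--         if best_d is None or d < best_d:
--             best_d = d
--             best_i = i
--     return listt[:best_i + 1], listt[best_i + 1:]
-- ===== Notes on version B (the rewrite author's own statement) =====
-- stated objective: faster
-- what changed: Replaces A's per-index recomputation of left and right sums (two inner loops per position) and the separate min-finding pass by a single pass keeping a running prefix sum and the best |total - 2*prefix| seen so far.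
import Mathlib
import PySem

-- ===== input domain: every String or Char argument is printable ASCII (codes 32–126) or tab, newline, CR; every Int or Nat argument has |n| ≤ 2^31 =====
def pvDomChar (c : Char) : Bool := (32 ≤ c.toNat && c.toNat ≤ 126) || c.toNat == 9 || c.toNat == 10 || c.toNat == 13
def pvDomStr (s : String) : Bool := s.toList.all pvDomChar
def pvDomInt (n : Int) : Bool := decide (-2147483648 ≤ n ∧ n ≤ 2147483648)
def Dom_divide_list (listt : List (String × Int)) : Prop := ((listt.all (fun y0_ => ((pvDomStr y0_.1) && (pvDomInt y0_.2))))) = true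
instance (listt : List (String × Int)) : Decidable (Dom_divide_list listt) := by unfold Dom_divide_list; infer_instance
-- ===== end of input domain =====

-- B replaces A's quadratic per-index left/right re-summation and separate min pass by one
-- prefix-sum pass tracking the minimal |total - 2*prefix| (objective: faster, O(n) vs O(n^2)).


-- ===== PORT A =====
-- literal transliteration of A: build all_m with two inner index loops, then scan for the
-- first minimum, then slice.
def divide_list (listt : List (String × Int)) : (List (String × Int)) × (List (String × Int)) :=
  let all_m : List Int := (PySem.List.pyRange 0 (PySem.List.len listt) 1).foldl
    (fun all_m i =>
      let right : Int := (PySem.List.pyRange (i + 1) (PySem.List.len listt) 1).foldl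
        (fun right j => right + (PySem.List.pyGetD listt j ("", 0)).2) 0
      let left : Int := (PySem.List.pyRange i (-1) (-1)).foldl
        (fun left l => left + (PySem.List.pyGetD listt l ("", 0)).2) 0
      let between := |right - left|
      all_m ++ [between]) []
  let min0 : Int × Int := (PySem.List.pyGetD all_m 0 0, 0)
  let min := (PySem.List.pyRange 1 (PySem.List.len all_m) 1).foldl
    (fun min z => if PySem.List.pyGetD all_m z 0 < min.1 then (PySem.List.pyGetD all_m z 0, z) else min)
    min0
  let index_of_min := min.2
  (PySem.List.slice listt (some 0) (some (index_of_min + 1)),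
   PySem.List.slice listt (some (index_of_min + 1)) none)

-- ===== PORT B =====
-- the loop body of Source B's single for-loop (state: run, best_d, best_i)
def pvAltStep (total : Int) (st : Int × Option Int × Int) (x : Int × (String × Int)) :
    Int × Option Int × Int :=
  let run := st.1 + x.2.2
  let d := |total - 2 * run|
  match st.2.1 with
  | none => (run, some d, x.1)
  | some bd => if d < bd then (run, some d, x.1) else (run, some bd, st.2.2)

def divide_list_alt (listt : List (String × Int)) : (List (String × Int)) × (List (String × Int)) :=
  let total : Int := (listt.map (fun p => p.2)).sum
  let st := (PySem.List.enumerate listt 0).foldl (pvAltStep total) (0, none, 0)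
  let best_i := st.2.2
  (PySem.List.slice listt none (some (best_i + 1)),
   PySem.List.slice listt (some (best_i + 1)) none)

-- ===== PRECONDITION & SPEC =====
-- Pre_ excludes only the empty list, on which A raises IndexError (all_m[0]).
def Pre_divide_list (listt : List (String × Int)) : Prop := listt ≠ []
instance (listt : List (String × Int)) : Decidable (Pre_divide_list listt) := by
  unfold Pre_divide_list; infer_instance
def pvWitness_divide_list : (List (String × Int)) := [("a", 1), ("b", 2)]

def Spec_divide_list (listt : List (String × Int)) (out : (List (String × Int)) × (List (String × Int))) : Prop := out = divide_list_alt listt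
instance (listt : List (String × Int)) (out : (List (String × Int)) × (List (String × Int))) : Decidable (Spec_divide_list listt out) := by unfold Spec_divide_list; infer_instance

-- ===== CLAIM (what is proved, stated in full; the proofs are below) =====
def Claim_equal_divide_list : Prop := ∀ (listt : List (String × Int)), Dom_divide_list listt → Pre_divide_list listt → Spec_divide_list listt (divide_list listt)

-- ===== LEMMAS AND PROOFS =====

-- the sequence of |total - 2*prefix| values, run = prefix sum consumed so far
def pvDlist (total run : Int) : List (String × Int) → List Int
  | [] => []
  | x :: xs => |total - 2 * (run + x.2)| :: pvDlist total (run + x.2) xs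

-- the strict-improvement argmin step shared by both min scans (state: (best value, best index))
def pvG (st : Int × Int) (p : Int × Int) : Int × Int :=
  if p.2 < st.1 then (p.2, p.1) else st

lemma pvDlist_eq (total run : Int) (xs : List (String × Int)) :
    pvDlist total run xs =
      (List.range xs.length).map
        (fun k => |total - 2 * (run + ((xs.take (k + 1)).map (fun p => p.2)).sum)|) := by
  induction xs generalizing run with
  | nil => simp [pvDlist]
  | cons x xs ih =>
      rw [pvDlist, ih, List.length_cons, List.range_succ_eq_map, List.map_cons, List.map_map]
      refine congrArg₂ List.cons (by simp) ?_
      refine List.map_congr_left fun k hk => ?_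
      simp [List.take_succ_cons, add_assoc]

lemma pvMap_take (listt : List (String × Int)) (m : Nat) (hm : m ≤ listt.length) :
    (PySem.List.pyRange 0 (m:Int) 1).map (fun j => PySem.List.pyGetD listt j ("", 0)) = listt.take m := by
  induction m with
  | zero => simp [PySem.List.pyRange_one_eq_nil]
  | succ m ih =>
      rw [show ((m+1 : Nat) : Int) = (m : Int) + 1 by push_cast; ring,
        PySem.List.pyRange_one_succ_right (by positivity), List.map_append]
      rw [ih (by omega)]
      have hlt : m < listt.length := by omega
      rw [List.map_singleton, PySem.List.pyGetD_natCast, List.take_add_one, List.getElem?_eq_getElem hlt]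
      simp [List.getD_eq_getElem?_getD, List.getElem?_eq_getElem hlt]

lemma pvAllm_eq (listt : List (String × Int)) :
    (PySem.List.pyRange 0 (PySem.List.len listt) 1).foldl
      (fun all_m i =>
        all_m ++ [|((PySem.List.pyRange (i + 1) (PySem.List.len listt) 1).foldl
            (fun right j => right + (PySem.List.pyGetD listt j ("", 0)).2) 0) -
          ((PySem.List.pyRange i (-1) (-1)).foldl
            (fun left l => left + (PySem.List.pyGetD listt l ("", 0)).2) 0)|]) [] =
    pvDlist ((listt.map (fun p => p.2)).sum) 0 listt := by
  rw [PySem.List.foldl_append_singleton_eq_map, pvDlist_eq]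
  rw [PySem.List.len_eq, PySem.List.pyRange_zero_natCast, List.map_map]
  refine List.map_congr_left fun k hk => ?_
  simp only [List.mem_range] at hk
  simp only [Function.comp_apply]
  -- right sum
  have hr : ((PySem.List.pyRange ((k:Int) + 1) (PySem.List.len listt) 1).foldl
      (fun right j => right + (PySem.List.pyGetD listt j ("", 0)).2) 0)
      = ((listt.drop (k+1)).map (fun p => p.2)).sum := by
    rw [show ((k:Int)+1) = ((k+1 : Nat) : Int) by push_cast; ring]
    rw [PySem.List.foldl_pyRange_pyGetD listt ("",0) (fun acc v => acc + v.2) 0 (by positivity)]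
    rw [PySem.List.foldl_add]
    simp
  -- left sum
  have hl : ((PySem.List.pyRange (k:Int) (-1) (-1)).foldl
      (fun left l => left + (PySem.List.pyGetD listt l ("", 0)).2) 0)
      = ((listt.take (k+1)).map (fun p => p.2)).sum := by
    rw [PySem.List.pyRange_neg_one_eq_reverse]
    rw [PySem.List.foldl_add]
    rw [show (-1 : Int) + 1 = 0 by ring]
    rw [List.map_reverse, List.sum_reverse]
    rw [show ((k:Int)+1) = ((k+1 : Nat) : Int) by push_cast; ring]
    have hcomp : (fun l => (PySem.List.pyGetD listt l ("", 0)).2)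
        = (fun p : String × Int => p.2) ∘ (fun j => PySem.List.pyGetD listt j ("", 0)) := rfl
    rw [hcomp, ← List.map_map, pvMap_take listt (k+1) (by omega)]
    simp
  rw [← PySem.List.len_eq, hr, hl]
  have hsplit : (listt.map (fun p => p.2)).sum
      = ((listt.take (k+1)).map (fun p => p.2)).sum + ((listt.drop (k+1)).map (fun p => p.2)).sum := by
    conv_lhs => rw [← List.take_append_drop (k+1) listt]
    rw [List.map_append, List.sum_append]
  rw [hsplit]
  ring_nf

lemma pvAmin_eq (ds : List Int) :
    (PySem.List.pyRange 1 (PySem.List.len ds) 1).foldl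
      (fun mn z => if PySem.List.pyGetD ds z 0 < mn.1 then (PySem.List.pyGetD ds z 0, z) else mn)
      (PySem.List.pyGetD ds 0 0, 0) =
    (PySem.List.enumerate ds 0).foldl pvG (ds.getD 0 0, 0) := by
  rw [PySem.List.enumerate_eq_map_pyRange ds 0, List.foldl_map]
  rcases ds with _ | ⟨d, rest⟩
  · simp [PySem.List.pyRange_one_eq_nil, PySem.List.pyGetD]
    decide
  · conv_rhs => rw [PySem.List.pyRange_one_cons
      (show (0:Int) < PySem.List.len (d :: rest) by rw [PySem.List.len_eq]; simp)]
    rw [List.foldl_cons, PySem.List.pyGetD_zero]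
    have h0 : pvG ((d :: rest).getD 0 0, 0) (0, (d :: rest).getD 0 0) = ((d :: rest).getD 0 0, 0) := by
      simp [pvG]
    rw [h0]
    simp only [pvG]
    norm_num

lemma pvBfold_eq (total : Int) (xs : List (String × Int)) (s run bv bi : Int) :
    (PySem.List.enumerate xs s).foldl (pvAltStep total) (run, some bv, bi) =
      (run + (xs.map (fun p => p.2)).sum,
       some ((PySem.List.enumerate (pvDlist total run xs) s).foldl pvG (bv, bi)).1,
       ((PySem.List.enumerate (pvDlist total run xs) s).foldl pvG (bv, bi)).2) := by
  induction xs generalizing s run bv bi with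
  | nil => simp [pvDlist, PySem.List.enumerate_nil]
  | cons x xs ih =>
      rw [pvDlist, PySem.List.enumerate_cons, PySem.List.enumerate_cons, List.foldl_cons, List.foldl_cons]
      have hstep : pvAltStep total (run, some bv, bi) (s, x) =
          if |total - 2 * (run + x.2)| < bv then (run + x.2, some |total - 2 * (run + x.2)|, s)
          else (run + x.2, some bv, bi) := rfl
      by_cases h : |total - 2 * (run + x.2)| < bv
      · rw [hstep, if_pos h,
          show pvG (bv, bi) (s, |total - 2 * (run + x.2)|) = (|total - 2 * (run + x.2)|, s) from by
            simp [pvG, h],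
          ih]
        simp [add_assoc]
      · rw [hstep, if_neg h,
          show pvG (bv, bi) (s, |total - 2 * (run + x.2)|) = (bv, bi) from by simp [pvG, h],
          ih]
        simp [add_assoc]

-- ===== VERDICT (by name: the statement is the Claim_ definition above) =====
theorem divide_list_spec : Claim_equal_divide_list := by
  intro listt _ hpre
  unfold Spec_divide_list
  rcases listt with _ | ⟨x, xs⟩
  · exact absurd rfl hpre
  simp only [divide_list, divide_list_alt]
  rw [pvAllm_eq (x :: xs), pvAmin_eq]
  rw [pvDlist, PySem.List.enumerate_cons, PySem.List.enumerate_cons,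
    List.foldl_cons, List.foldl_cons]
  rw [show pvAltStep (((x :: xs).map (fun p => p.2)).sum) (0, none, 0) (0, x) =
      (0 + x.2, some |((x :: xs).map (fun p => p.2)).sum - 2 * (0 + x.2)|, 0) from rfl]
  rw [pvBfold_eq]
  rw [show pvG (((|((x :: xs).map (fun p => p.2)).sum - 2 * (0 + x.2)| : Int) :: pvDlist (((x :: xs).map (fun p => p.2)).sum) (0 + x.2) xs).getD 0 0, 0)
      (0, |((x :: xs).map (fun p => p.2)).sum - 2 * (0 + x.2)|) =
      ((|((x :: xs).map (fun p => p.2)).sum - 2 * (0 + x.2)| : Int), 0) from by simp [pvG]]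
  simp [PySem.List.slice_zero_start]
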